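-- pv_equiv track=rewrite | github.com/lesh23/CodingTest_Practice | HJ/Lv0.py | solution
-- ===== SOURCE A (Python) =====
-- def solution(arr, flag):
--     answer = []
--     for i,f in enumerate(flag):
--         if f == True:
--             for j in range(arr[i]*2):
--                 answer.append(arr[i])
--         else:
--             for i in range(arr[i]):
--                 if answer==[]:
--                     pass
--                 else:
--                     answer.pop()
--
--
--     return answer
-- ===== SOURCE B (Python) =====
-- def solution(arr, flag):
--     # Run-length-encoded stack: each entry (value, count), top at the end.
--     runs = []
--     for v, f in zip(arr, flag):
--         if f:
--             if v > 0:
--                 runs.append((v, 2 * v))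
--         else:
--             k = v
--             while k > 0 and runs:
--                 val, c = runs[-1]
--                 if c <= k:
--                     runs.pop()
--                     k -= c
--                 else:
--                     runs[-1] = (val, c - k)
--                     k = 0
--     out = []
--     for val, c in runs:
--         out.extend([val] * c)
--     return out
-- ===== Notes on version B (the rewrite author's own statement) =====
-- stated objective: faster
-- what changed: Replaces A's element-by-element stack simulation (appending arr[i] 2*arr[i] times, popping one element per step) with a run-length-encoded stack of (value,count) pairs that pops by decrementing counts and expands once at the end.
import Mathlib
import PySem

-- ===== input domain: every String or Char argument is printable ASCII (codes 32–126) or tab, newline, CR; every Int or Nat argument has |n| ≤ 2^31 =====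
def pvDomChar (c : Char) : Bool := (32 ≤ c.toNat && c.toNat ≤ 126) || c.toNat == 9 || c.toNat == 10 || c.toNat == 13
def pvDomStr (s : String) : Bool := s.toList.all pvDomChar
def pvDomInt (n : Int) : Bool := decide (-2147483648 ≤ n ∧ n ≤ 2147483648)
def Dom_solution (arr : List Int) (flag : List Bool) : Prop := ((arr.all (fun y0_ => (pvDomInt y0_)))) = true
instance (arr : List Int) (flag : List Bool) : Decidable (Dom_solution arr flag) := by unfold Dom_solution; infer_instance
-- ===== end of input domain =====

-- B replaces A's element-by-element stack simulation by a run-length-encoded stack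
-- (push one (value, 2*value) run; pops decrement run counts), expanded once at the end.

-- ===== PORT A =====
-- inner loop 'for i in range(arr[i]): if answer==[]: pass else: answer.pop()'
def solutionPopLoop (k : Int) (answer : List Int) : List Int :=
  (PySem.List.pyRange 0 k 1).foldl (fun acc _ => if acc = [] then acc else acc.dropLast) answer

-- 'for i,f in enumerate(flag)' with body as in A; arr[i] via pyGet? (Pre_ keeps it in range)
def solutionGo (arr : List Int) (flag : List Bool) (i : Nat) (answer : List Int) : List Int :=
  match flag with
  | [] => answer
  | f :: rest =>
    let a := (PySem.List.pyGet? arr (Int.ofNat i)).getD 0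
    let answer' :=
      if f = true then
        (PySem.List.pyRange 0 (a * 2) 1).foldl (fun acc _ => acc ++ [a]) answer
      else
        solutionPopLoop a answer
    solutionGo arr rest (i + 1) answer'

def solution (arr : List Int) (flag : List Bool) : List Int :=
  solutionGo arr flag 0 []

-- ===== PORT B =====
-- B's while-loop: pop (or shrink) the last run while k > 0 and runs remain
def popWhile (k : Int) (runs : List (Int × Int)) : List (Int × Int) :=
  match h : runs.getLast? with
  | none => runs
  | some (val, c) =>
    if k ≤ 0 then runs
    else if c ≤ k then popWhile (k - c) runs.dropLast
    else runs.dropLast ++ [(val, c - k)]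
termination_by runs.length
decreasing_by
  have hne : runs ≠ [] := by intro h'; simp [h'] at h
  have : 0 < runs.length := List.length_pos_of_ne_nil hne
  simp [List.length_dropLast]; omega

def solution_alt (arr : List Int) (flag : List Bool) : List Int :=
  let runs := (arr.zip flag).foldl
    (fun runs vf =>
      if vf.2 then (if vf.1 > 0 then runs ++ [(vf.1, 2 * vf.1)] else runs)
      else popWhile vf.1 runs) []
  runs.flatMap (fun p => List.replicate p.2.toNat p.1)

-- ===== PRECONDITION & SPEC =====
-- A raises IndexError (arr[i]) when flag is longer than arr; excluded.
def Pre_solution (arr : List Int) (flag : List Bool) : Prop := flag.length ≤ arr.length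
instance (arr : List Int) (flag : List Bool) : Decidable (Pre_solution arr flag) := by unfold Pre_solution; infer_instance
def pvWitness_solution : List Int × List Bool := ([2, 1, 3], [true, false, true])

def Spec_solution (arr : List Int) (flag : List Bool) (out : List Int) : Prop := out = solution_alt arr flag
instance (arr : List Int) (flag : List Bool) (out : List Int) : Decidable (Spec_solution arr flag out) := by unfold Spec_solution; infer_instance

-- ===== CLAIM (what is proved, stated in full; the proofs are below) =====
def Claim_equal_solution : Prop := ∀ (arr : List Int) (flag : List Bool), Dom_solution arr flag → Pre_solution arr flag → Spec_solution arr flag (solution arr flag)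

-- ===== LEMMAS AND PROOFS =====

def expandRuns (runs : List (Int × Int)) : List Int :=
  runs.flatMap (fun p => List.replicate p.2.toNat p.1)

-- A's push loop appends a constant run
theorem pushLoop_eq (L : List Int) (a : Int) (answer : List Int) :
    L.foldl (fun acc _ => acc ++ [a]) answer = answer ++ List.replicate L.length a := by
  induction L generalizing answer with
  | nil => simp
  | cons x xs ih => simp [List.foldl, ih, List.replicate_succ]

-- A's pop loop takes a prefix
theorem popFold_eq (L : List Int) (answer : List Int) :
    L.foldl (fun acc _ => if acc = [] then acc else acc.dropLast) answer
      = answer.take (answer.length - L.length) := by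
  induction L generalizing answer with
  | nil => simp
  | cons x xs ih =>
    simp only [List.foldl]
    by_cases h : answer = []
    · simp [h, ih]
    · rw [if_neg h, ih, List.dropLast_eq_take, List.take_take, List.length_take]
      have : answer.length ≠ 0 := by simpa using h
      congr 1
      simp only [List.length_cons]
      omega

theorem popLoop_eq (k : Int) (answer : List Int) :
    solutionPopLoop k answer = answer.take (answer.length - k.toNat) := by
  have := popFold_eq (PySem.List.pyRange 0 k 1) answer
  simpa [solutionPopLoop, PySem.List.length_pyRange_one] using this

theorem popWhile_nil (k : Int) : popWhile k [] = [] := by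
  rw [popWhile]; rfl

theorem popWhile_concat (k : Int) (rs : List (Int × Int)) (val c : Int) :
    popWhile k (rs ++ [(val, c)]) =
      if k ≤ 0 then rs ++ [(val, c)]
      else if c ≤ k then popWhile (k - c) rs
      else rs ++ [(val, c - k)] := by
  rw [popWhile]
  split
  · rename_i h; simp at h
  · rename_i val1 c1 h
    rw [List.getLast?_concat] at h
    have h1 : val1 = val := by cases h; rfl
    have h2 : c1 = c := by cases h; rfl
    subst h1; subst h2
    simp [List.dropLast_concat]

theorem expandRuns_append (r1 r2 : List (Int × Int)) :
    expandRuns (r1 ++ r2) = expandRuns r1 ++ expandRuns r2 := by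
  simp [expandRuns]

-- B's while loop drops k.toNat elements from the end of the expansion
theorem popWhile_expand (k : Int) (runs : List (Int × Int))
    (hpos : ∀ p ∈ runs, 0 < p.2) :
    expandRuns (popWhile k runs)
      = (expandRuns runs).take ((expandRuns runs).length - k.toNat)
    ∧ ∀ p ∈ popWhile k runs, 0 < p.2 := by
  induction runs using List.reverseRecOn generalizing k with
  | nil => simp [popWhile_nil, expandRuns]
  | append_singleton rs p ih =>
    obtain ⟨val, c⟩ := p
    have hc : 0 < c := hpos (val, c) (by simp)
    have hpos' : ∀ q ∈ rs, 0 < q.2 := fun q hq => hpos q (by simp [hq])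
    rw [popWhile_concat]
    have hE : expandRuns (rs ++ [(val, c)])
        = expandRuns rs ++ List.replicate c.toNat val := by
      simp [expandRuns_append, expandRuns]
    split_ifs with hk hck
    · constructor
      · have : k.toNat = 0 := by omega
        simp [this]
      · exact hpos
    · obtain ⟨ihE, ihP⟩ := ih (k - c) hpos'
      refine ⟨?_, ihP⟩
      rw [ihE, hE]
      rw [List.take_append_of_le_length (by simp; omega)]
      congr 1
      simp
      omega
    · refine ⟨?_, ?_⟩
      · rw [hE, expandRuns_append]
        have h1 : (expandRuns rs ++ List.replicate c.toNat val).length - k.toNat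
            = (expandRuns rs).length + (c.toNat - k.toNat) := by simp; omega
        rw [h1, List.take_append, List.take_replicate]
        rw [List.take_of_length_le (by omega)]
        have h3 : (expandRuns rs).length + (c.toNat - k.toNat) - (expandRuns rs).length
            = c.toNat - k.toNat := by omega
        rw [h3]
        have h2 : min (c.toNat - k.toNat) c.toNat = (c - k).toNat := by omega
        rw [h2]
        simp [expandRuns]
      · intro q hq
        rcases List.mem_append.mp hq with h' | h'
        · exact hpos' q h'
        · simp at h'; subst h'; simp; omega

-- loop invariant: A's answer is always the expansion of B's run stack
theorem main_inv (flag : List Bool) (arr : List Int) (i : Nat) (answer : List Int)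
    (runs : List (Int × Int))
    (hlen : i + flag.length ≤ arr.length)
    (hexp : expandRuns runs = answer)
    (hpos : ∀ p ∈ runs, 0 < p.2) :
    solutionGo arr flag i answer
      = expandRuns (((arr.drop i).zip flag).foldl
          (fun runs vf =>
            if vf.2 then (if vf.1 > 0 then runs ++ [(vf.1, 2 * vf.1)] else runs)
            else popWhile vf.1 runs) runs) := by
  induction flag generalizing i answer runs with
  | nil => simpa [solutionGo] using hexp.symm
  | cons f rest ih =>
    have hi : i < arr.length := by simp at hlen; omega
    have hdrop : arr.drop i = arr[i] :: arr.drop (i + 1) :=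
      List.drop_eq_getElem_cons hi
    have hget : (PySem.List.pyGet? arr (Int.ofNat i)).getD 0 = arr[i] := by
      have : PySem.List.pyGet? arr (Int.ofNat i) = arr[i]? := by
        simpa using PySem.List.pyGet?_natCast arr i
      rw [this, List.getElem?_eq_getElem hi]
      rfl
    rw [hdrop]
    simp only [List.zip_cons_cons, List.foldl_cons, solutionGo, hget]
    cases f with
    | true =>
      simp only [reduceIte]
      by_cases ha : arr[i] > 0
      · rw [if_pos ha]
        apply ih (i + 1) _ _ (by simp at hlen ⊢; omega)
        · rw [expandRuns_append, hexp]
          have : (PySem.List.pyRange 0 (arr[i] * 2) 1).length = (arr[i] * 2).toNat := by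
            simp [PySem.List.length_pyRange_one]
          rw [pushLoop_eq, this]
          have hm : arr[i] * 2 = 2 * arr[i] := mul_comm _ _
          rw [hm]
          simp [expandRuns]
        · intro q hq
          rcases List.mem_append.mp hq with h' | h'
          · exact hpos q h'
          · simp at h'; subst h'; simp; omega
      · rw [if_neg ha]
        apply ih (i + 1) _ _ (by simp at hlen ⊢; omega) _ hpos
        rw [pushLoop_eq, hexp]
        have : (PySem.List.pyRange 0 (arr[i] * 2) 1).length = 0 := by
          simp [PySem.List.length_pyRange_one]; omega
        simp [this]
    | false =>
      obtain ⟨hE, hP⟩ := popWhile_expand arr[i] runs hpos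
      apply ih (i + 1) _ _ (by simp at hlen ⊢; omega) _ hP
      rw [hE, hexp, popLoop_eq]
      simp

-- ===== VERDICT (by name: the statement is the Claim_ definition above) =====
theorem solution_spec : Claim_equal_solution := by
  intro arr flag _ hpre
  unfold Spec_solution solution solution_alt
  have := main_inv flag arr 0 [] [] (by simpa [Pre_solution] using hpre) (by simp [expandRuns]) (by simp)
  simpa [expandRuns] using this
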